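-- pv_equiv track=rewrite | github.com/AydinTokuslu/Python2024 | exercise14.py | odd2_even2
-- ===== SOURCE A (Python) =====
-- def odd2_even2(list):
--     odd = []
--     even = []
--     for i in list:
--         if i % 2 == 0:
--             even.append(i)
--         else:
--             odd.append(i)
--     return f"{max(even)} - {min(odd)} = {max(even) - min(odd)}"
-- ===== SOURCE B (Python) =====
-- def odd2_even2(list):
--     max_even = None
--     min_odd = None
--     for i in list:
--         if i % 2 == 0:
--             if max_even is None or i > max_even:
--                 max_even = i
--         else:
--             if min_odd is None or i < min_odd:
--                 min_odd = i
--     if max_even is None or min_odd is None: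
--         raise ValueError("list must contain at least one even and one odd number")
--     return f"{max_even} - {min_odd} = {max_even - min_odd}"
-- ===== Notes on version B (the rewrite author's own statement) =====
-- stated objective: alternative
-- what changed: Single pass maintaining running max_even/min_odd sentinels instead of building two lists and scanning them with max()/min(); O(1) extra space instead of O(n).
-- outside the precondition, e.g. on odd2_even2([2, 4]): A raises ValueError, B raises ValueError
import Mathlib
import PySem

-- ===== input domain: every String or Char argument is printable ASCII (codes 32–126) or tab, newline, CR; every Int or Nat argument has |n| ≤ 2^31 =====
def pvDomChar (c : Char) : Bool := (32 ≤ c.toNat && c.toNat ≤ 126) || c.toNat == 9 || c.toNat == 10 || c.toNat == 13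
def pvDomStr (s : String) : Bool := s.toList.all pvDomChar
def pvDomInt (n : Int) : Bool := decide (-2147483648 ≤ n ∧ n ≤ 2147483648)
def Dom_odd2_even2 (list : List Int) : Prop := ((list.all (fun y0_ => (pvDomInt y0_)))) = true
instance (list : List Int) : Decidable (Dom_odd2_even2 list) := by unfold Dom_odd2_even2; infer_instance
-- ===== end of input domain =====

-- B replaces A's two intermediate lists + max()/min() scans by a single pass with running
-- optional max-even/min-odd accumulators (alternative decomposition, O(1) extra space).


-- ===== PORT A =====
-- Builds (odd, even) lists by one loop, then formats max(even), min(odd), and their difference.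
-- The '_, _ => ""' arm is unreachable under Pre_ (Python raises ValueError there).
def odd2_even2 (list : List Int) : String :=
  let st := list.foldl
    (fun (st : List Int × List Int) i =>
      if PySem.Int.mod i 2 == 0 then (st.1, st.2 ++ [i]) else (st.1 ++ [i], st.2))
    ([], [])
  match PySem.List.max? st.2 (fun x => x), PySem.List.min? st.1 (fun x => x) with
  | some M, some m =>
      PySem.Int.toStr M ++ " - " ++ PySem.Int.toStr m ++ " = " ++ PySem.Int.toStr (M - m)
  | _, _ => ""

-- ===== PORT B =====
-- Single pass: running max_even / min_odd as Options (None = absent).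
-- The '_, _ => ""' arm is where Source B raises ValueError (outside Pre_).
def odd2_even2_alt (list : List Int) : String :=
  let st := list.foldl
    (fun (st : Option Int × Option Int) i =>
      if PySem.Int.mod i 2 == 0 then
        ((match st.1 with | none => some i | some M => if i > M then some i else some M), st.2)
      else
        (st.1, (match st.2 with | none => some i | some m => if i < m then some i else some m)))
    (none, none)
  match st.1 with
  | none => ""  -- Source B raises ValueError here (no even element; outside Pre_)
  | some M =>
    match st.2 with
    | none => ""  -- Source B raises ValueError here (no odd element; outside Pre_)
    | some m =>
        PySem.Int.toStr M ++ " - " ++ PySem.Int.toStr m ++ " = " ++ PySem.Int.toStr (M - m)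

-- ===== PRECONDITION & SPEC =====
-- Pre_ excludes inputs with no even or no odd element: there Python A raises
-- ValueError (max()/min() of an empty sequence), and Python B also raises ValueError.
def Pre_odd2_even2 (list : List Int) : Prop :=
  (list.any (fun i => PySem.Int.mod i 2 == 0)) = true ∧
  (list.any (fun i => !(PySem.Int.mod i 2 == 0))) = true
instance (list : List Int) : Decidable (Pre_odd2_even2 list) := by unfold Pre_odd2_even2; infer_instance
def pvWitness_odd2_even2 : List Int := [1, 2]

def Spec_odd2_even2 (list : List Int) (out : String) : Prop := out = odd2_even2_alt list
instance (list : List Int) (out : String) : Decidable (Spec_odd2_even2 list out) := by unfold Spec_odd2_even2; infer_instance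

-- ===== CLAIM (what is proved, stated in full; the proofs are below) =====
def Claim_equal_odd2_even2 : Prop := ∀ (list : List Int), Dom_odd2_even2 list → Pre_odd2_even2 list → Spec_odd2_even2 list (odd2_even2 list)

-- ===== LEMMAS AND PROOFS =====

-- B's even-branch update on the running max.
def pvOMax (o : Option Int) (i : Int) : Option Int :=
  match o with | none => some i | some M => if i > M then some i else some M

-- B's odd-branch update on the running min.
def pvOMin (o : Option Int) (i : Int) : Option Int :=
  match o with | none => some i | some m => if i < m then some i else some m

theorem pvMax?_append (e : List Int) (i : Int) :
    PySem.List.max? (e ++ [i]) (fun x => x) = pvOMax (PySem.List.max? e (fun x => x)) i := by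
  cases e with
  | nil =>
      have h0 : PySem.List.max? ([] : List Int) (fun x => x) = none := rfl
      rw [List.nil_append, h0, PySem.List.max?_id_cons]
      simp [pvOMax]
  | cons x t =>
      rw [List.cons_append, PySem.List.max?_id_cons, PySem.List.max?_id_cons]
      simp only [pvOMax, List.foldl_append, List.foldl_cons, List.foldl_nil]
      by_cases h : (t.foldl max x) < i
      · rw [if_pos h, max_eq_right (le_of_lt h)]
      · rw [if_neg h, max_eq_left (not_lt.mp h)]

theorem pvMin?_append (o : List Int) (i : Int) :
    PySem.List.min? (o ++ [i]) (fun x => x) = pvOMin (PySem.List.min? o (fun x => x)) i := by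
  cases o with
  | nil =>
      have h0 : PySem.List.min? ([] : List Int) (fun x => x) = none := rfl
      rw [List.nil_append, h0, PySem.List.min?_id_cons]
      simp [pvOMin]
  | cons x t =>
      rw [List.cons_append, PySem.List.min?_id_cons, PySem.List.min?_id_cons]
      simp only [pvOMin, List.foldl_append, List.foldl_cons, List.foldl_nil]
      by_cases h : i < (t.foldl min x)
      · rw [if_pos h, min_eq_right (le_of_lt h)]
      · rw [if_neg h, min_eq_left (not_lt.mp h)]

-- Main invariant: B's fold state is exactly (max? of A's even list, min? of A's odd list).
theorem pv_invariant (l : List Int) : ∀ (o e : List Int),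
    l.foldl
      (fun (st : Option Int × Option Int) i =>
        if PySem.Int.mod i 2 == 0 then (pvOMax st.1 i, st.2) else (st.1, pvOMin st.2 i))
      (PySem.List.max? e (fun x => x), PySem.List.min? o (fun x => x))
    = (PySem.List.max?
        (l.foldl (fun (st : List Int × List Int) i =>
          if PySem.Int.mod i 2 == 0 then (st.1, st.2 ++ [i]) else (st.1 ++ [i], st.2)) (o, e)).2
        (fun x => x),
       PySem.List.min?
        (l.foldl (fun (st : List Int × List Int) i =>
          if PySem.Int.mod i 2 == 0 then (st.1, st.2 ++ [i]) else (st.1 ++ [i], st.2)) (o, e)).1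
        (fun x => x)) := by
  induction l with
  | nil => intro o e; simp
  | cons i t ih =>
      intro o e
      cases hc : (PySem.Int.mod i 2 == 0) with
      | true =>
          simp only [List.foldl_cons, hc, if_true]
          rw [← pvMax?_append]
          exact ih o (e ++ [i])
      | false =>
          simp only [List.foldl_cons, hc, Bool.false_eq_true, if_false]
          rw [← pvMin?_append]
          exact ih (o ++ [i]) e

-- ===== VERDICT (by name: the statement is the Claim_ definition above) =====
theorem odd2_even2_spec : Claim_equal_odd2_even2 := by
  intro list _ _
  simp only [Spec_odd2_even2, odd2_even2, odd2_even2_alt]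
  have hfun : (fun (st : Option Int × Option Int) i =>
      if PySem.Int.mod i 2 == 0 then
        ((match st.1 with | none => some i | some M => if i > M then some i else some M), st.2)
      else
        (st.1, (match st.2 with | none => some i | some m => if i < m then some i else some m)))
      = (fun (st : Option Int × Option Int) i =>
      if PySem.Int.mod i 2 == 0 then (pvOMax st.1 i, st.2) else (st.1, pvOMin st.2 i)) := by
    funext st i; simp [pvOMax, pvOMin]
  rw [hfun]
  have h := pv_invariant list [] []
  have h0 : (PySem.List.max? ([] : List Int) (fun x => x),
             PySem.List.min? ([] : List Int) (fun x => x))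
      = ((none : Option Int), (none : Option Int)) := rfl
  rw [h0] at h
  rw [h]
  rcases hM : PySem.List.max?
      ((list.foldl (fun (st : List Int × List Int) i =>
        if PySem.Int.mod i 2 == 0 then (st.1, st.2 ++ [i]) else (st.1 ++ [i], st.2)) ([], [])).2)
      (fun x => x) with _ | M <;>
    rcases hm : PySem.List.min?
      ((list.foldl (fun (st : List Int × List Int) i =>
        if PySem.Int.mod i 2 == 0 then (st.1, st.2 ++ [i]) else (st.1 ++ [i], st.2)) ([], [])).1)
      (fun x => x) with _ | m <;>
    simp [hM, hm]
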